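-- pv_equiv track=rewrite | github.com/milad9005/quera_110016 | ex.py | trac
-- ===== SOURCE A (Python) =====
-- def trac (a,b,lst):
--     sumOfDiff=0
--     cost = 0
--     cost_s=0
--     min = lst[0]
--     have_trac_cost= False
--     max_l = max(lst)
--
--     if(len(lst)<2):
--         return 0
--
--     for _ in range(len(lst)):
--
--         diffr = max_l - lst[0]
--         cost_s += (diffr*a)
--         if(lst[0]>min):
--             sumOfDiff += (lst[0]-min)
--             lst.pop(0)
--             if(not have_trac_cost):
--                 have_trac_cost=True
--                 cost+=b
--         elif(lst[0]<min):
--             diff = min-lst[0]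
--             if(diff>sumOfDiff):
--                 need = diff - sumOfDiff
--                 sumOfDiff += need
--                 cost += (need * a)
--             sumOfDiff-=diff
--             lst.pop(0)
--         else:
--             lst.pop(0)
--
--     while sumOfDiff>0:
--         if(sumOfDiff>=min):
--             sumOfDiff-=min
--         else:
--             diff = min - sumOfDiff
--             cost+=(diff*a)
--             sumOfDiff=0
--
--     if cost_s > cost:
--         return cost
--     else:
--         return cost_s
-- ===== SOURCE B (Python) =====
-- def trac(a, b, lst):
--     if len(lst) < 2:
--         return 0
--     m = lst[0]
--     n = len(lst)
--     mx = max(lst)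
--     total = sum(lst)
--     cost_s = a * (n * mx - total)
--     # max suffix sum of (x - m), clipped at 0, by one reverse pass
--     run = 0
--     best = 0
--     for x in reversed(lst):
--         run += x - m
--         if run > best:
--             best = run
--     S = best
--     T = total - n * m
--     cost = (b if any(x > m for x in lst) else 0) + a * (S - T)
--     if S > 0:
--         r = S % m
--         if r:
--             cost += a * (m - r)
--     return min(cost, cost_s)
-- ===== Notes on version B (the rewrite author's own statement) =====
-- stated objective: faster
-- what changed: B replaces A's quadratic pop(0) simulation and its repeated-subtraction while loop by a single reverse pass computing the maximum suffix sum of deviations, closed-form arithmetic for the accumulated costs, and one modulo operation for the trailing loop.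
import Mathlib
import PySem

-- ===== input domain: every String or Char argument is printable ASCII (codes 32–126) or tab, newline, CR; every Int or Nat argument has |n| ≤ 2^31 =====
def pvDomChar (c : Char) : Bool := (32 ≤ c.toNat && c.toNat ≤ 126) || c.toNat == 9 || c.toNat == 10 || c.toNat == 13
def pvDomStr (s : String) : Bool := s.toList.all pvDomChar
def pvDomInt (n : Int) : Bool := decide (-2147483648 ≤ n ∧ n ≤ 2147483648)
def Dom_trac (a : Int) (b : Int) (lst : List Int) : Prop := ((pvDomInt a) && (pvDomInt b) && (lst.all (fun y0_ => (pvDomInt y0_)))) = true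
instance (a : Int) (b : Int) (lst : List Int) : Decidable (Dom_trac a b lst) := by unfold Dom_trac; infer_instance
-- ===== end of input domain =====

-- B replaces A's pop(0) simulation loop and repeated-subtraction while loop by a single
-- reverse pass (max suffix sum) plus closed-form arithmetic and a modulo; note A empties
-- lst in place (pop(0)) while B leaves it untouched — the equivalence is about the return value.

-- ===== PORT A =====
-- the for-loop of A: it runs len(lst) times and pops the front each time, i.e. it
-- processes the elements of lst in order; state (sumOfDiff, cost, cost_s, have_trac_cost)
def tracLoop (a b mn mx : Int) : List Int → Int → Int → Int → Bool → Int × Int × Int × Bool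
  | [], s, cost, cost_s, h => (s, cost, cost_s, h)
  | x :: rest, s, cost, cost_s, h =>
    let cost_s' := cost_s + (mx - x) * a
    if mn < x then
      tracLoop a b mn mx rest (s + (x - mn)) (if h then cost else cost + b) cost_s' true
    else if x < mn then
      let d := mn - x
      if s < d then
        tracLoop a b mn mx rest (s + (d - s) - d) (cost + (d - s) * a) cost_s' h
      else
        tracLoop a b mn mx rest (s - d) cost cost_s' h
    else
      tracLoop a b mn mx rest s cost cost_s' h

-- the trailing 'while sumOfDiff>0' loop; the extra '0 < mn' guard only makes the port
-- total: Python diverges there (Pre_ excludes that region), so no input is misported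
def tracWhile (a mn : Int) (s cost : Int) : Int :=
  if h : 0 < s ∧ 0 < mn then
    if mn ≤ s then tracWhile a mn (s - mn) cost
    else cost + (mn - s) * a
  else cost
termination_by s.toNat
decreasing_by omega

def trac (a : Int) (b : Int) (lst : List Int) : Int :=
  match lst with
  | [] => 0   -- Python raises IndexError on lst[0] here; Pre_ excludes it
  | mn :: _ =>
    let mx := (PySem.List.max? lst (fun y => y)).getD 0
    if lst.length < 2 then 0
    else
      let r := tracLoop a b mn mx lst 0 0 0 false
      let cost := tracWhile a mn r.1 r.2.1
      if cost < r.2.2.1 then cost else r.2.2.1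

-- ===== PORT B =====
def trac_alt (a : Int) (b : Int) (lst : List Int) : Int :=
  if lst.length < 2 then 0
  else
    match lst with
    | [] => 0   -- unreachable: length ≥ 2
    | m :: _ =>
      let n : Int := lst.length
      let mx := (PySem.List.max? lst (fun y => y)).getD 0
      let total := lst.foldl (· + ·) 0
      let cost_s := a * (n * mx - total)
      let p := lst.reverse.foldl
        (fun (p : Int × Int) x =>
          let run := p.1 + (x - m); (run, if p.2 < run then run else p.2)) (0, 0)
      let S := p.2
      let T := total - n * m
      let cost := (if lst.any (fun x => decide (m < x)) then b else 0) + a * (S - T)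
      let cost := if 0 < S then
          (let r := PySem.Int.mod S m; if r ≠ 0 then cost + a * (m - r) else cost)
        else cost
      min cost cost_s

-- ===== PRECONDITION & SPEC =====
-- plain sum of a list (used by Pre_ and the proofs)
def sumL : List Int → Int
  | [] => 0
  | x :: l => x + sumL l

-- Pre_ excludes exactly the empty list, on which A raises IndexError, and the inputs on
-- which A's trailing repeated-subtraction loop DIVERGES (A returns no value): those where
-- the first element (A's 'min') is nonpositive and some suffix of the list sums to more
-- than that first element times the suffix length, leaving a positive surplus to the loop.
def Pre_trac (a : Int) (b : Int) (lst : List Int) : Prop :=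
  lst ≠ [] ∧ (0 < lst.headI ∨
    ∀ i ∈ List.range lst.length, sumL (lst.drop i) ≤ lst.headI * (lst.drop i).length)
instance (a : Int) (b : Int) (lst : List Int) : Decidable (Pre_trac a b lst) := by
  unfold Pre_trac; infer_instance

def pvWitness_trac : Int × Int × List Int := (2, 7, [3, 5, 1, 4])

def Spec_trac (a : Int) (b : Int) (lst : List Int) (out : Int) : Prop := out = trac_alt a b lst
instance (a : Int) (b : Int) (lst : List Int) (out : Int) : Decidable (Spec_trac a b lst out) := by unfold Spec_trac; infer_instance

-- ===== CLAIM (what is proved, stated in full; the proofs are below) =====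
def Claim_equal_trac : Prop := ∀ (a : Int) (b : Int) (lst : List Int), Dom_trac a b lst → Pre_trac a b lst → Spec_trac a b lst (trac a b lst)

-- ===== LEMMAS AND PROOFS =====

-- sum of the deviations x - m
def sumD (m : Int) : List Int → Int
  | [] => 0
  | x :: l => (x - m) + sumD m l

-- max over all suffixes (including the empty one) of the suffix sum of deviations
def maxSuf (m : Int) : List Int → Int
  | [] => 0
  | x :: l => max (sumD m (x :: l)) (maxSuf m l)

lemma sumD_le_maxSuf (m : Int) (l : List Int) : sumD m l ≤ maxSuf m l := by
  cases l with
  | nil => simp [sumD, maxSuf]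
  | cons x t => simp [maxSuf]

lemma maxSuf_nonneg (m : Int) (l : List Int) : 0 ≤ maxSuf m l := by
  induction l with
  | nil => simp [maxSuf]
  | cons x t ih => simp [maxSuf]; right; exact ih

lemma sumD_eq (m : Int) (l : List Int) : sumD m l = sumL l - m * l.length := by
  induction l with
  | nil => simp [sumD, sumL]
  | cons x t ih => simp [sumD, sumL, ih]; push_cast; ring

-- Pre_'s suffix-sum condition forces the final surplus to be ≤ 0
lemma maxSuf_nonpos (m : Int) (l : List Int)
    (h : ∀ i ∈ List.range l.length, sumL (l.drop i) ≤ m * (l.drop i).length) :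
    maxSuf m l ≤ 0 := by
  induction l with
  | nil => simp [maxSuf]
  | cons x t ih =>
    have h0 := h 0 (by simp)
    have hD : sumD m (x :: t) ≤ 0 := by
      rw [sumD_eq]
      simpa using h0
    have ht : maxSuf m t ≤ 0 := by
      refine ih ?_
      intro i hi
      have := h (i + 1) (by simp at hi ⊢; omega)
      simpa using this
    simp only [maxSuf]
    omega

-- characterisation of A's main loop
lemma tracLoop_eq (a b mn mx : Int) (l : List Int) (s cost cost_s : Int) (h : Bool)
    (hs : 0 ≤ s) :
    tracLoop a b mn mx l s cost cost_s h =
      (max (s + sumD mn l) (maxSuf mn l),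
       cost + (if h = false ∧ l.any (fun x => decide (mn < x)) then b else 0)
            + a * (max (s + sumD mn l) (maxSuf mn l) - (s + sumD mn l)),
       cost_s + (mx * l.length - sumL l) * a,
       h || l.any (fun x => decide (mn < x))) := by
  induction l generalizing s cost cost_s h with
  | nil =>
    simp only [tracLoop, sumD, maxSuf, sumL, List.any_nil, List.length_nil, Prod.mk.injEq,
      Bool.false_eq_true, and_false, if_false, Bool.or_false, Nat.cast_zero]
    have hm0 : max (s + 0) (0 : Int) = s + 0 := by omega
    rw [hm0]
    refine ⟨by omega, by ring, by ring, trivial⟩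
  | cons x t ih =>
    have hmt : sumD mn t ≤ maxSuf mn t := sumD_le_maxSuf mn t
    have hsd : sumD mn (x :: t) = (x - mn) + sumD mn t := rfl
    have hms : maxSuf mn (x :: t) = max (sumD mn (x :: t)) (maxSuf mn t) := rfl
    have hln : ((x :: t).length : Int) = (t.length : Int) + 1 := by
      push_cast [List.length_cons]; ring
    have hsl : sumL (x :: t) = x + sumL t := rfl
    by_cases hx : mn < x
    · -- x > min branch
      have hany : ((x :: t).any fun y => decide (mn < y)) = true := by
        simp [List.any_cons, hx]
      rw [show tracLoop a b mn mx (x :: t) s cost cost_s h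
            = tracLoop a b mn mx t (s + (x - mn)) (if h then cost else cost + b)
                (cost_s + (mx - x) * a) true by simp [tracLoop, hx]]
      rw [ih _ _ _ _ (by omega)]
      have hmax : max (s + (x - mn) + sumD mn t) (maxSuf mn t)
          = max (s + sumD mn (x :: t)) (maxSuf mn (x :: t)) := by
        rw [hsd, hms, hsd]; omega
      simp only [Prod.mk.injEq]
      refine ⟨hmax, ?_, ?_, ?_⟩
      · rw [hmax, hsd, hany]
        cases h <;>
          simp only [Bool.true_eq_false, Bool.false_eq_true, false_and, if_false, true_and,
            and_true, eq_self_iff_true, if_true, ite_true, ite_false, add_zero] <;>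
          ring
      · rw [hsl, hln]; ring
      · rw [hany]; cases h <;> simp
    · by_cases hx2 : x < mn
      · have hany : ((x :: t).any fun y => decide (mn < y))
              = (t.any fun y => decide (mn < y)) := by
          simp [List.any_cons, hx]
        by_cases hd : s < mn - x
        · -- deficit larger than surplus: inject, surplus drops to 0
          rw [show tracLoop a b mn mx (x :: t) s cost cost_s h
                = tracLoop a b mn mx t (s + ((mn - x) - s) - (mn - x))
                    (cost + ((mn - x) - s) * a) (cost_s + (mx - x) * a) h by
              simp [tracLoop, hx, hx2, hd]]
          rw [ih _ _ _ _ (by omega)]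
          have e0 : s + ((mn - x) - s) - (mn - x) = 0 := by ring
          have hmax : max (s + ((mn - x) - s) - (mn - x) + sumD mn t) (maxSuf mn t)
              = max (s + sumD mn (x :: t)) (maxSuf mn (x :: t)) := by
            rw [e0, hsd, hms, hsd]; omega
          simp only [Prod.mk.injEq]
          refine ⟨hmax, ?_, ?_, ?_⟩
          · rw [hmax, e0, hsd, hany]; ring
          · rw [hsl, hln]; ring
          · rw [hany]
        · -- deficit covered by surplus
          rw [show tracLoop a b mn mx (x :: t) s cost cost_s h
                = tracLoop a b mn mx t (s - (mn - x)) cost (cost_s + (mx - x) * a) h by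
              simp [tracLoop, hx, hx2, hd]]
          rw [ih _ _ _ _ (by omega)]
          have hmax : max (s - (mn - x) + sumD mn t) (maxSuf mn t)
              = max (s + sumD mn (x :: t)) (maxSuf mn (x :: t)) := by
            rw [hsd, hms, hsd]; omega
          simp only [Prod.mk.injEq]
          refine ⟨hmax, ?_, ?_, ?_⟩
          · rw [hmax, hsd, hany]; ring
          · rw [hsl, hln]; ring
          · rw [hany]
      · -- x = min
        have hany : ((x :: t).any fun y => decide (mn < y))
            = (t.any fun y => decide (mn < y)) := by
          simp [List.any_cons, hx]
        have hxe : x = mn := by omega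
        rw [show tracLoop a b mn mx (x :: t) s cost cost_s h
              = tracLoop a b mn mx t s cost (cost_s + (mx - x) * a) h by
            simp [tracLoop, hx, hx2]]
        rw [ih _ _ _ _ hs]
        have hmax : max (s + sumD mn t) (maxSuf mn t)
            = max (s + sumD mn (x :: t)) (maxSuf mn (x :: t)) := by
          rw [hsd, hms, hsd, hxe]; omega
        simp only [Prod.mk.injEq]
        refine ⟨hmax, ?_, ?_, ?_⟩
        · rw [hmax, hsd, hany, hxe]; ring
        · rw [hsl, hln]; ring
        · rw [hany]

-- characterisation of B's reverse pass
lemma revPass_eq (m : Int) (l : List Int) :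
    l.reverse.foldl
      (fun (p : Int × Int) x =>
        let run := p.1 + (x - m); (run, if p.2 < run then run else p.2)) (0, 0)
    = (sumD m l, maxSuf m l) := by
  rw [List.foldl_reverse]
  induction l with
  | nil => simp [sumD, maxSuf]
  | cons x t ih =>
    simp only [List.foldr_cons, ih]
    simp only [Prod.mk.injEq, sumD, maxSuf]
    constructor
    · ring
    · have := sumD_le_maxSuf m t
      split <;> omega

lemma foldl_add_eq_sumL (l : List Int) (c : Int) : l.foldl (· + ·) c = c + sumL l := by
  induction l generalizing c with
  | nil => simp [sumL]
  | cons x t ih => simp [List.foldl_cons, ih, sumL]; ring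

-- characterisation of A's trailing while loop, for a positive minimum
lemma tracWhile_eq (a mn : Int) (hm : 0 < mn) :
    ∀ (n : Nat) (s cost : Int), s.toNat = n → 0 ≤ s →
      tracWhile a mn s cost
        = if 0 < s then
            (if PySem.Int.mod s mn ≠ 0 then cost + a * (mn - PySem.Int.mod s mn) else cost)
          else cost := by
  intro n
  induction n using Nat.strong_induction_on with
  | _ n ih =>
    intro s cost hn hs
    rw [tracWhile]
    by_cases hpos : 0 < s
    · rw [dif_pos ⟨hpos, hm⟩, if_pos hpos, PySem.Int.mod_eq_emod_of_pos hm]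
      by_cases hle : mn ≤ s
      · rw [if_pos hle, ih (s - mn).toNat (by omega) (s - mn) cost rfl (by omega),
            PySem.Int.mod_eq_emod_of_pos hm, Int.sub_emod_right]
        by_cases hz : 0 < s - mn
        · rw [if_pos hz]
        · have hse : s = mn := by omega
          subst hse
          rw [if_neg hz]
          simp [Int.emod_self]
      · rw [if_neg hle]
        have hmod : s % mn = s := Int.emod_eq_of_lt (by omega) (by omega)
        rw [hmod, if_pos (show s ≠ 0 by omega)]
        ring
    · rw [dif_neg (fun hc => hpos hc.1), if_neg hpos]

lemma tracWhile_zero (a mn cost : Int) : tracWhile a mn 0 cost = cost := by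
  rw [tracWhile]; simp

lemma ite_min (x y : Int) : (if x < y then x else y) = min x y := by omega

-- ===== VERDICT (by name: the statement is the Claim_ definition above) =====
theorem trac_spec : Claim_equal_trac := by
  intro a b lst _ hpre
  obtain ⟨hne, hrest⟩ := hpre
  obtain ⟨m, t, rfl⟩ : ∃ m t, lst = m :: t := by
    cases lst with
    | nil => exact absurd rfl hne
    | cons m t => exact ⟨m, t, rfl⟩
  unfold Spec_trac
  by_cases hlen : (m :: t).length < 2
  · have ht : t = [] := List.eq_nil_of_length_eq_zero (by simpa using hlen)
    subst ht
    simp [trac, trac_alt]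
  · have hS : 0 ≤ maxSuf m (m :: t) := maxSuf_nonneg m (m :: t)
    have hsum : sumD m (m :: t) ≤ maxSuf m (m :: t) := sumD_le_maxSuf m (m :: t)
    have hmaxeq : max (sumD m (m :: t)) (maxSuf m (m :: t)) = maxSuf m (m :: t) := by
      omega
    simp only [trac, trac_alt, if_neg hlen,
      tracLoop_eq a b m _ (m :: t) 0 0 0 false le_rfl, revPass_eq, foldl_add_eq_sumL,
      zero_add, hmaxeq, true_and]
    have hD : sumD m (m :: t) = sumL (m :: t) - ((m :: t).length : Int) * m := by
      rw [sumD_eq]; ring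
    rw [hD]
    rw [show (((PySem.List.max? (m :: t) fun y => y).getD 0) * ((m :: t).length : Int)
          - sumL (m :: t)) * a
        = a * (((m :: t).length : Int) * ((PySem.List.max? (m :: t) fun y => y).getD 0)
          - sumL (m :: t)) by ring]
    rcases hrest with hm | hall
    · have hm' : 0 < m := by simpa using hm
      rw [show ∀ c : Int, tracWhile a m (maxSuf m (m :: t)) c
            = if 0 < maxSuf m (m :: t) then
                (if PySem.Int.mod (maxSuf m (m :: t)) m ≠ 0 then
                   c + a * (m - PySem.Int.mod (maxSuf m (m :: t)) m)
                 else c)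
              else c
          from fun c => tracWhile_eq a m hm' _ _ c rfl hS]
      exact ite_min _ _
    · have hz : maxSuf m (m :: t) = 0 := by
        have := maxSuf_nonpos m (m :: t) (by simpa using hall)
        omega
      rw [hz, tracWhile_zero, if_neg (lt_irrefl 0)]
      exact ite_min _ _
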